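-- pv_equiv track=rewrite | github.com/zkstewart/Various_scripts | Function_packages/ZS_SeqIO.py | get_chunking_points
-- ===== SOURCE A (Python) =====
-- import os, inspect, sys, hashlib, time, random, re, math
--
-- def get_chunking_points(numberToChunk, chunks, isNumOfChunks=True):
--     '''
--     This is a general purpose function to take in a number of "things"
--     that you want to chunk, and find out how to chunk them evenly.
--
--     The resulting list should be interpreted as the 0-based indices where
--     a new chunk should form. You should check for this index at the start
--     of a loop, and form a new file if your index == the value in this list.
--
--     Also, this uses "allocated chunking" such that it will try to keep
--     the number of things per chunk approximately equal. Even if you specify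
--     X number of things per chunk, it might be more optimal to have X-1 in each
--     chunk so as to make sure the last chunk doesn't contain a single thing.
--     This might not be what you want, but usually, allocated chunking leads to
--     more optimal code (e.g., a major use of this function would be for
--     parallel processing of the chunks).
--
--     Params:
--         numberToChunk -- an integer value, possibly derived from a list length as example.
--         chunks -- an integer value for the desired number of chunks OR the number of
--                   sequences to contain within each chunk, determined by
--         isNumOfChunks -- a boolean indicating whether you want the number to be the number
--                          of chunks (True), or the number of sequences within each chunk (False)
--     '''
--     assert isinstance(numberToChunk, int)
--     assert isinstance(chunks, int)
--     if numberToChunk < chunks: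
--         raise Exception(f"Chunking only valid if chunkSize <= chunks i.e., {chunks} <= {numberToChunk}")
--
--     # Derive how many chunks we want to split the file into
--     if isNumOfChunks:
--         numChunks = chunks
--     else:
--         numChunks = math.ceil(numberToChunk / chunks)
--
--     rawNum = numberToChunk / numChunks # This line is more relevant in the multithreading code I took this from, but it's okay to just leave it.
--     numRoundedUp = round((rawNum % 1) * numChunks, 0) # By taking the decimal place and multiplying it by the num of chunks, we can figure out how many chunks need to be rounded up
--
--     # Store positions at which to start a new chunk
--     chunkPoints = []
--     ongoingCount = 0
--     for i in range(numChunks):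
--
--         # Determine where chunks begin in 0-based indexing
--         if i < numRoundedUp: # decide if the number of sequences in this chunk should be rounded up
--             point = math.ceil(rawNum) + ongoingCount # Round up the rawNum, and also add our ongoingCount which corresponds to the number of things already put into a chunk
--
--             # Prevent chunking beyond the last index where a chunk should start
--             if point >= numberToChunk: # Without this check, if we have more chunks than things to chunk, we can end up with "extra" numbers in the list (e.g., [1, 2, 3, 4, 5, 6, 6, 6, 6, 6]).
--                 break  # This doesn't actually affect program function, but for aesthetic reasons and for clarity of how this function works, I prevent this from occurring.
--
--             chunkPoints.append(point)
--             ongoingCount += math.ceil(rawNum)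
--         else:
--             point = math.floor(rawNum) + ongoingCount # Round down the rawNum since we've already accounted for any extra uneven numbers
--
--             if point >= numberToChunk:
--                 break
--
--             chunkPoints.append(point)
--             ongoingCount += math.floor(rawNum)
--
--     return chunkPoints
-- ===== SOURCE B (Python) =====
-- def get_chunking_points(numberToChunk, chunks, isNumOfChunks=True):
--     assert isinstance(numberToChunk, int)
--     assert isinstance(chunks, int)
--     if numberToChunk < chunks:
--         raise Exception(f"Chunking only valid if chunkSize <= chunks i.e., {chunks} <= {numberToChunk}")
--
--     # exact integer ceiling division replaces the float ceil
--     numChunks = chunks if isNumOfChunks else -(-numberToChunk // chunks)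
--
--     # closed form: the start of chunk k (0-based index) is k*small + min(k, rem),
--     # since the first rem chunks hold small+1 things and the rest hold small.
--     small, rem = divmod(numberToChunk, numChunks)
--     return [k * small + min(k, rem)
--             for k in range(1, numChunks)
--             if k * small + min(k, rem) < numberToChunk]
-- ===== Notes on version B (the rewrite author's own statement) =====
-- stated objective: simpler
-- what changed: Replaces A's stateful loop (running ongoingCount, per-iteration ceil/floor branch, break) by a stateless closed-form comprehension: the start of chunk k is directly k*small + min(k, rem) with small, rem = divmod(numberToChunk, numChunks), filtered by < numberToChunk; all float arithmetic becomes exact integer arithmetic and no accumulation or size list is built.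
import Mathlib
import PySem

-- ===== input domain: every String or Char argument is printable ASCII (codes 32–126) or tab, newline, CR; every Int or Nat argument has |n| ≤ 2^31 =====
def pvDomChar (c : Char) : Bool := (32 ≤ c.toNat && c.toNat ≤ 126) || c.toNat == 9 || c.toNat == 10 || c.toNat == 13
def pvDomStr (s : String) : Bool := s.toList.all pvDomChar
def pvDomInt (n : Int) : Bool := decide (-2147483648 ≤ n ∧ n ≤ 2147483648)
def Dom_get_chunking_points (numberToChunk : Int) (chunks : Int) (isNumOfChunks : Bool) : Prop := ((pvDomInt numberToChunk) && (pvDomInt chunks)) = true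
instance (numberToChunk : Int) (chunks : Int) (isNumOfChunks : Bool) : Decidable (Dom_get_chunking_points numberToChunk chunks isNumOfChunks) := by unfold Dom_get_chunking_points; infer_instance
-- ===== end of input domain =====

-- B replaces A's stateful loop (running ongoingCount, per-iteration ceil/floor branch, break) by a
-- stateless closed-form comprehension: the start of chunk k is k*small + min(k, rem) with
-- small, rem = divmod(numberToChunk, numChunks), filtered by < numberToChunk; objective: simpler.
-- Float note: on the domain |ints| ≤ 2^31 A's float expressions are exact and the port uses the
-- exact integer forms: math.ceil(a / b) = -((-a) // b), math.floor(rawNum) = n // numChunks,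
-- round((rawNum % 1) * numChunks, 0) = n % numChunks (PySem.Int.floordiv / mod).

-- ===== PORT A =====
-- the for-loop with break, over range(numChunks); state = (ongoingCount, chunkPoints)
def gcpLoop (n rawCeil rawFloor numRoundedUp : Int) :
    List Int → Int → List Int → List Int
  | [], _, acc => acc
  | i :: rest, ongoing, acc =>
    if i < numRoundedUp then
      let point := rawCeil + ongoing
      if n ≤ point then acc
      else gcpLoop n rawCeil rawFloor numRoundedUp rest (ongoing + rawCeil) (acc ++ [point])
    else
      let point := rawFloor + ongoing
      if n ≤ point then acc
      else gcpLoop n rawCeil rawFloor numRoundedUp rest (ongoing + rawFloor) (acc ++ [point])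

def get_chunking_points (numberToChunk : Int) (chunks : Int) (isNumOfChunks : Bool) : List Int :=
  let numChunks := if isNumOfChunks then chunks
                   else -(PySem.Int.floordiv (-numberToChunk) chunks)  -- math.ceil(numberToChunk / chunks), exact
  let rawCeil := -(PySem.Int.floordiv (-numberToChunk) numChunks)      -- math.ceil(rawNum), exact
  let rawFloor := PySem.Int.floordiv numberToChunk numChunks           -- math.floor(rawNum), exact
  let numRoundedUp := PySem.Int.mod numberToChunk numChunks            -- round((rawNum % 1) * numChunks, 0), exact
  gcpLoop numberToChunk rawCeil rawFloor numRoundedUp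
    (PySem.List.pyRange 0 numChunks 1) 0 []

-- ===== PORT B =====
-- the list comprehension: closed-form point k*small + min(k, rem), filtered by < numberToChunk
def get_chunking_points_alt (numberToChunk : Int) (chunks : Int) (isNumOfChunks : Bool) : List Int :=
  let numChunks := if isNumOfChunks then chunks
                   else -(PySem.Int.floordiv (-numberToChunk) chunks)
  let small := PySem.Int.floordiv numberToChunk numChunks
  let rem := PySem.Int.mod numberToChunk numChunks
  (PySem.List.pyRange 1 numChunks 1).filterMap (fun k =>
    if k * small + min k rem < numberToChunk then some (k * small + min k rem) else none)

-- ===== PRECONDITION & SPEC =====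
-- Pre_ excludes exactly the inputs where A raises: numberToChunk < chunks (explicit raise), and the
-- ZeroDivisionError cases chunks = 0 and (with isNumOfChunks=False) ceil(numberToChunk/chunks) = 0.
def Pre_get_chunking_points (numberToChunk : Int) (chunks : Int) (isNumOfChunks : Bool) : Prop :=
  chunks ≤ numberToChunk ∧ chunks ≠ 0 ∧
  (isNumOfChunks = false → -(PySem.Int.floordiv (-numberToChunk) chunks) ≠ 0)
instance (numberToChunk : Int) (chunks : Int) (isNumOfChunks : Bool) : Decidable (Pre_get_chunking_points numberToChunk chunks isNumOfChunks) := by unfold Pre_get_chunking_points; infer_instance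

def pvWitness_get_chunking_points : Int × Int × Bool := (10, 3, true)

def Spec_get_chunking_points (numberToChunk : Int) (chunks : Int) (isNumOfChunks : Bool) (out : List Int) : Prop := out = get_chunking_points_alt numberToChunk chunks isNumOfChunks
instance (numberToChunk : Int) (chunks : Int) (isNumOfChunks : Bool) (out : List Int) : Decidable (Spec_get_chunking_points numberToChunk chunks isNumOfChunks out) := by unfold Spec_get_chunking_points; infer_instance

-- ===== CLAIM (what is proved, stated in full; the proofs are below) =====
def Claim_equal_get_chunking_points : Prop := ∀ (numberToChunk : Int) (chunks : Int) (isNumOfChunks : Bool), Dom_get_chunking_points numberToChunk chunks isNumOfChunks → Pre_get_chunking_points numberToChunk chunks isNumOfChunks → Spec_get_chunking_points numberToChunk chunks isNumOfChunks (get_chunking_points numberToChunk chunks isNumOfChunks)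

-- ===== LEMMAS AND PROOFS =====

-- running sums, proof-only (characterises A's ongoingCount)
def pyAccumulate (o : Int) : List Int → List Int
  | [] => []
  | s :: rest => (o + s) :: pyAccumulate (o + s) rest

-- A's loop, run over any index list, appends to acc the running totals of the per-index
-- sizes (rawCeil below index R, rawFloor from R on), kept while they stay < n.
theorem gcpLoop_eq_takeWhile (n c f R : Int) :
    ∀ (is : List Int) (o : Int) (acc : List Int),
      gcpLoop n c f R is o acc
        = acc ++ List.takeWhile (fun p => decide (p < n))
            (pyAccumulate o (is.map (fun i => if i < R then c else f))) := by
  intro is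
  induction is with
  | nil => intro o acc; simp [gcpLoop, pyAccumulate]
  | cons i rest ih =>
    intro o acc
    rw [List.map_cons]
    by_cases hi : i < R
    · simp only [gcpLoop, if_pos hi, pyAccumulate, List.takeWhile_cons]
      by_cases hb : n ≤ c + o
      · have h1 : ¬ (o + c < n) := by omega
        simp [hb, h1]
      · have h1 : o + c < n := by omega
        rw [if_neg hb, ih]
        simp only [h1, decide_true, if_true, List.append_assoc, List.singleton_append]
        rw [Int.add_comm c o]
    · simp only [gcpLoop, if_neg hi, pyAccumulate, List.takeWhile_cons]
      by_cases hb : n ≤ f + o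
      · have h1 : ¬ (o + f < n) := by omega
        simp [hb, h1]
      · have h1 : o + f < n := by omega
        rw [if_neg hb, ih]
        simp only [h1, decide_true, if_true, List.append_assoc, List.singleton_append]
        rw [Int.add_comm f o]

-- the running totals of A's per-index sizes are exactly B's closed-form points:
-- pyAccumulate started at f a over indices a..M-1 yields f (a+1), …, f M with f k = k*F + min k R
theorem accumulate_closed_form (M F R c : Int) (hR0 : 0 ≤ R) (hc : R ≠ 0 → c = F + 1) :
    ∀ (d : Nat) (a : Int), 0 ≤ a → a + d = M →
      pyAccumulate (a * F + min a R) ((PySem.List.pyRange a M 1).map (fun i => if i < R then c else F))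
        = (PySem.List.pyRange (a + 1) (M + 1) 1).map (fun k => k * F + min k R) := by
  intro d
  induction d with
  | zero =>
    intro a ha hM
    have h1 : M ≤ a := by omega
    rw [PySem.List.pyRange_one_eq_nil h1, PySem.List.pyRange_one_eq_nil (by omega)]
    simp [pyAccumulate]
  | succ d ih =>
    intro a ha hM
    have haM : a < M := by omega
    rw [PySem.List.pyRange_one_cons haM, List.map_cons]
    rw [PySem.List.pyRange_one_cons (show a + 1 < M + 1 by omega), List.map_cons]
    have hstep : a * F + min a R + (if a < R then c else F) = (a + 1) * F + min (a + 1) R := by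
      by_cases hi : a < R
      · have hcF : c = F + 1 := hc (by omega)
        have h1 : min a R = a := by omega
        have h2 : min (a + 1) R = a + 1 := by omega
        rw [if_pos hi, hcF, h1, h2]; ring
      · have h1 : min a R = R := by omega
        have h2 : min (a + 1) R = R := by omega
        rw [if_neg hi, h1, h2]; ring
    simp only [pyAccumulate, hstep]
    rw [ih (a + 1) (by omega) (by omega)]

-- takeWhile ignores a trailing element the predicate rejects
theorem takeWhile_append_singleton_false {α : Type} (p : α → Bool) (x : α) (hx : p x = false) :
    ∀ (l : List α), List.takeWhile p (l ++ [x]) = List.takeWhile p l := by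
  intro l
  induction l with
  | nil => simp [List.takeWhile, hx]
  | cons a t ih =>
    by_cases ha : p a
    · simp [List.takeWhile_cons, ha, ih]
    · simp [List.takeWhile_cons, ha]

-- the key arithmetic fact: once a point ≥ n, every later point (index ≤ M-1) is ≥ n too
theorem point_ge_of_ge (M F R n a k : Int) (hR0 : 0 ≤ R) (hRM : R < M)
    (hn : n = F * M + R) (h1a : 1 ≤ a) (hak : a ≤ k) (hkM : k < M)
    (hge : n ≤ a * F + min a R) : n ≤ k * F + min k R := by
  by_cases hF : 0 ≤ F
  · -- F ≥ 0: points are monotone nondecreasing in the index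
    have hmono : a * F + min a R ≤ k * F + min k R := by
      have h1 : a * F ≤ k * F := by
        exact mul_le_mul_of_nonneg_right hak hF
      have h2 : min a R ≤ min k R := by omega
      omega
    omega
  · -- F < 0 (only possible for negative numberToChunk): every point with index < M is ≥ n
    have hF1 : F ≤ -1 := by omega
    have h1 : M - k ≤ (M - k) * (-F) := by
      nlinarith
    have h2 : R - min k R < M - k := by omega
    nlinarith

-- with the key fact, taking-while below n over B's range equals filtering below n
theorem takeWhile_eq_filterMap (M F R n : Int) (hR0 : 0 ≤ R) (hRM : R < M)
    (hn : n = F * M + R) :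
    ∀ (d : Nat) (a : Int), 1 ≤ a → a + d = M →
      List.takeWhile (fun p => decide (p < n))
          ((PySem.List.pyRange a M 1).map (fun k => k * F + min k R))
        = (PySem.List.pyRange a M 1).filterMap (fun k =>
            if k * F + min k R < n then some (k * F + min k R) else none) := by
  intro d
  induction d with
  | zero =>
    intro a ha hM
    rw [PySem.List.pyRange_one_eq_nil (by omega)]
    simp
  | succ d ih =>
    intro a ha hM
    have haM : a < M := by omega
    rw [PySem.List.pyRange_one_cons haM, List.map_cons, List.takeWhile_cons, List.filterMap_cons]
    by_cases hp : a * F + min a R < n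
    · simp only [hp, decide_true, if_true]
      rw [ih (a + 1) (by omega) (by omega)]
    · simp only [hp, decide_false, Bool.false_eq_true, if_false]
      -- no later point is < n either, so the filterMap of the tail is empty
      have hrest : ∀ k ∈ PySem.List.pyRange (a + 1) M 1,
          (if k * F + min k R < n then some (k * F + min k R) else none) = (none : Option Int) := by
        intro k hk
        rw [PySem.List.mem_pyRange_one] at hk
        have := point_ge_of_ge M F R n a k hR0 hRM hn ha (by omega) (by omega) (by omega)
        rw [if_neg (by omega)]
      rw [List.filterMap_eq_nil_iff.mpr hrest]

-- ===== VERDICT (by name: the statement is the Claim_ definition above) =====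
theorem get_chunking_points_spec : Claim_equal_get_chunking_points := by
  intro n ch b _hdom hpre
  obtain ⟨hle, hch, hceil⟩ := hpre
  unfold Spec_get_chunking_points
  simp only [get_chunking_points, get_chunking_points_alt]
  set M : Int := if b then ch else -(PySem.Int.floordiv (-n) ch) with hM
  have hM0 : M ≠ 0 := by
    cases b with
    | false => exact hceil rfl
    | true => simpa [hM] using hch
  rcases lt_or_gt_of_ne hM0 with hneg | hpos
  · -- numChunks < 0: both loops run over an empty range
    rw [PySem.List.pyRange_one_eq_nil (le_of_lt hneg),
        PySem.List.pyRange_one_eq_nil (by omega)]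
    simp [gcpLoop]
  · -- numChunks > 0: exact division facts
    set F := PySem.Int.floordiv n M with hF
    set R := PySem.Int.mod n M with hRdef
    have hRe : R = n % M := PySem.Int.mod_eq_emod_of_pos hpos
    have hR0 : 0 ≤ R := by rw [hRe]; exact Int.emod_nonneg _ (by omega)
    have hRM : R < M := by rw [hRe]; exact Int.emod_lt_of_pos _ hpos
    have hFR : F * M + R = n := PySem.Int.floordiv_mul_add_mod n M
    have hc : R ≠ 0 → -(PySem.Int.floordiv (-n) M) = F + 1 := by
      intro hR0'
      rw [PySem.Int.neg_floordiv_neg_eq_iff_of_pos hpos]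
      constructor
      · have h : (F + 1 - 1) * M = F * M := by ring
        rw [h]
        have hRpos : 0 < R := lt_of_le_of_ne hR0 (Ne.symm hR0')
        linarith
      · have h : (F + 1) * M = F * M + M := by ring
        rw [h]; linarith
    rw [gcpLoop_eq_takeWhile, List.nil_append]
    have h00 : (0 : Int) = 0 * F + min 0 R := by
      have : min (0 : Int) R = 0 := by omega
      rw [this]; ring
    rw [show pyAccumulate 0 ((PySem.List.pyRange 0 M 1).map
          (fun i => if i < R then -(PySem.Int.floordiv (-n) M) else F))
        = pyAccumulate (0 * F + min 0 R) ((PySem.List.pyRange 0 M 1).map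
          (fun i => if i < R then -(PySem.Int.floordiv (-n) M) else F)) by rw [← h00]]
    rw [accumulate_closed_form M F R _ hR0 hc M.toNat 0 le_rfl (by omega)]
    rw [show (0 : Int) + 1 = 1 by ring]
    -- split off the last point f M = n, which the takeWhile rejects
    rw [PySem.List.pyRange_one_succ_right (by omega), List.map_append, List.map_singleton]
    have hfM : M * F + min M R = n := by
      have : min M R = R := by omega
      rw [this]; linarith
    rw [takeWhile_append_singleton_false _ _ (by simp [hfM])]
    exact takeWhile_eq_filterMap M F R n hR0 hRM (by linarith) (M - 1).toNat 1 le_rfl (by omega)
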